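-- pv_equiv track=rewrite | github.com/jskinn/arvet | arvet/batch_analysis/job_systems/hpc_job_system.py | merge_expected_durations
-- ===== SOURCE A (Python) =====
-- import typing
--
-- def merge_expected_durations(durations: typing.Iterable[str]) -> str:
--     """
--     Join together the estimated times of multiple tasks into a combined time
--     :param durations:
--     :return:
--     """
--     hours = 0
--     minutes = 0
--     seconds = 0
--     for duration in durations:
--         parts = duration.split(':')
--         if len(parts) >= 3:
--             hours += int(parts[0])
--             minutes += int(parts[1])
--             seconds += int(parts[2])
--     minutes += seconds // 60
--     seconds = seconds % 60
--     hours += minutes // 60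
--     minutes = minutes % 60
--     return "{0:02}:{1:02}:{2:02}".format(hours, minutes, seconds)
-- ===== SOURCE B (Python) =====
-- def _duration_seconds(duration):
--     parts = duration.split(':')
--     if len(parts) >= 3:
--         return int(parts[0]) * 3600 + int(parts[1]) * 60 + int(parts[2])
--     return 0
--
--
-- def _total_seconds(durations):
--     # divide-and-conquer: sum the two halves recursively
--     n = len(durations)
--     if n == 0:
--         return 0
--     if n == 1:
--         return _duration_seconds(durations[0])
--     mid = n // 2
--     return _total_seconds(durations[:mid]) + _total_seconds(durations[mid:])
--
--
-- def merge_expected_durations(durations):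
--     total = _total_seconds(list(durations))
--     hours, rem = divmod(total, 3600)
--     minutes, seconds = divmod(rem, 60)
--     return "{0:02}:{1:02}:{2:02}".format(hours, minutes, seconds)
-- ===== Notes on version B (the rewrite author's own statement) =====
-- stated objective: alternative
-- what changed: Replaces A's linear loop with three running accumulators and an end-of-loop carry chain by a divide-and-conquer recursion that sums per-item total seconds over binary halves of the list, then recovers hours/minutes/seconds with two divmods.
import Mathlib
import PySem

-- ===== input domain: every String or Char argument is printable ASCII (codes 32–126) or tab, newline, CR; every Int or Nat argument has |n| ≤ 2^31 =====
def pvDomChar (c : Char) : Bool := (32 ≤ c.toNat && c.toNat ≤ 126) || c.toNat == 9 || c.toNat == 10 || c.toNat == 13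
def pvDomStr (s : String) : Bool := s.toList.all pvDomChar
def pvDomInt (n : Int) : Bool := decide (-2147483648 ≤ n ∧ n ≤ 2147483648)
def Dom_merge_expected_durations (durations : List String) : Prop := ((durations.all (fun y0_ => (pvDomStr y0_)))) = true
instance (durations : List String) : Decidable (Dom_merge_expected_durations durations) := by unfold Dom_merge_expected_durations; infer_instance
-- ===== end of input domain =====

-- B replaces A's linear three-accumulator loop and end-of-loop carry chain by a
-- divide-and-conquer recursion summing per-item total seconds over binary halves,
-- normalized with two divmods (objective: alternative).

-- ===== PORT A =====
-- "{0:02}".format(n) for an int n = str(n).zfill(2)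
def pvFmt02 (n : Int) : String := PySem.Str.zfill (PySem.Int.toStr n) 2

-- the loop body of A: parts = duration.split(':'); if len(parts) >= 3: add the three components
-- (split? with the nonempty separator ":" is always some; getD 0 is exact under Pre_, which demands int() succeeds)
def pvStepA (acc : Int × Int × Int) (d : String) : Int × Int × Int :=
  let parts := (PySem.Str.split? d ":").getD []
  if 3 ≤ parts.length then
    (acc.1 + (PySem.Int.ofStr? (parts.getD 0 "")).getD 0,
     acc.2.1 + (PySem.Int.ofStr? (parts.getD 1 "")).getD 0,
     acc.2.2 + (PySem.Int.ofStr? (parts.getD 2 "")).getD 0)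
  else acc

def merge_expected_durations (durations : List String) : String :=
  let st := durations.foldl pvStepA (0, 0, 0)
  let minutes := st.2.1 + PySem.Int.floordiv st.2.2 60
  let seconds := PySem.Int.mod st.2.2 60
  let hours := st.1 + PySem.Int.floordiv minutes 60
  let minutes := PySem.Int.mod minutes 60
  PySem.Str.join ":" [pvFmt02 hours, pvFmt02 minutes, pvFmt02 seconds]

-- ===== PORT B =====
-- _duration_seconds: split, guard, weighted sum of the first three parts (getD 0 exact under Pre_)
def pvItemSeconds (d : String) : Int :=
  let parts := (PySem.Str.split? d ":").getD []
  if 3 ≤ parts.length then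
    (PySem.Int.ofStr? (parts.getD 0 "")).getD 0 * 3600
      + (PySem.Int.ofStr? (parts.getD 1 "")).getD 0 * 60
      + (PySem.Int.ofStr? (parts.getD 2 "")).getD 0
  else 0

-- _total_seconds: divide-and-conquer over binary halves
-- (durations[:mid] = take mid, durations[mid:] = drop mid — exact since 0 ≤ mid ≤ len;
--  durations[0] on a length-1 list = head)
def pvTotalSeconds (ds : List String) : Int :=
  if ds.length = 0 then 0
  else if ds.length = 1 then pvItemSeconds (ds.headD "")
  else
    let mid := ds.length / 2
    pvTotalSeconds (ds.take mid) + pvTotalSeconds (ds.drop mid)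
termination_by ds.length
decreasing_by
  · simp only [List.length_take]; omega
  · simp only [List.length_drop]; omega

def merge_expected_durations_alt (durations : List String) : String :=
  let total := pvTotalSeconds durations
  let hours := PySem.Int.floordiv total 3600
  let rem := PySem.Int.mod total 3600
  let minutes := PySem.Int.floordiv rem 60
  let seconds := PySem.Int.mod rem 60
  PySem.Str.join ":" [pvFmt02 hours, pvFmt02 minutes, pvFmt02 seconds]

-- ===== PRECONDITION & SPEC =====
-- Pre_ excludes exactly the inputs where Python's int() raises ValueError: a duration with >= 3
-- colon-separated parts whose first three parts are not all valid integer literals.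
def Pre_merge_expected_durations (durations : List String) : Prop :=
  ∀ d ∈ durations,
    let parts := (PySem.Str.split? d ":").getD []
    3 ≤ parts.length →
      ((PySem.Int.ofStr? (parts.getD 0 "")).isSome ∧
       (PySem.Int.ofStr? (parts.getD 1 "")).isSome ∧
       (PySem.Int.ofStr? (parts.getD 2 "")).isSome)
instance (durations : List String) : Decidable (Pre_merge_expected_durations durations) := by
  unfold Pre_merge_expected_durations; infer_instance

def pvWitness_merge_expected_durations : List String := ["01:02:03", "-5:200:-3000", "soon"]

def Spec_merge_expected_durations (durations : List String) (out : String) : Prop := out = merge_expected_durations_alt durations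
instance (durations : List String) (out : String) : Decidable (Spec_merge_expected_durations durations out) := by unfold Spec_merge_expected_durations; infer_instance

-- ===== CLAIM (what is proved, stated in full; the proofs are below) =====
def Claim_equal_merge_expected_durations : Prop := ∀ (durations : List String), Dom_merge_expected_durations durations → Pre_merge_expected_durations durations → Spec_merge_expected_durations durations (merge_expected_durations durations)

-- ===== LEMMAS AND PROOFS =====

-- B's divide-and-conquer total equals the plain sum of per-item seconds (addition is associative).
theorem pvTotalSeconds_eq (ds : List String) : pvTotalSeconds ds = (ds.map pvItemSeconds).sum := by
  induction ds using pvTotalSeconds.induct with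
  | case1 ds h0 =>
    rw [pvTotalSeconds]
    simp [List.eq_nil_of_length_eq_zero h0]
  | case2 ds h0 h1 =>
    rw [pvTotalSeconds]
    obtain ⟨a, rfl⟩ := List.length_eq_one_iff.mp h1
    simp [h1]
  | case3 ds h0 h1 mid ih1 ih2 =>
    rw [pvTotalSeconds]
    simp only [h0, h1, if_false]
    rw [ih1, ih2, ← List.sum_append, ← List.map_append, List.take_append_drop]

-- A's running triple (h, m, s) always satisfies 3600h + 60m + s = sum of per-item seconds.
theorem pv_fold_sum (ds : List String) (acc : Int × Int × Int) :
    3600 * (ds.foldl pvStepA acc).1 + 60 * (ds.foldl pvStepA acc).2.1 +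
        (ds.foldl pvStepA acc).2.2 =
      3600 * acc.1 + 60 * acc.2.1 + acc.2.2 + (ds.map pvItemSeconds).sum := by
  induction ds generalizing acc with
  | nil => simp
  | cons d ds ih =>
    simp only [List.foldl_cons, List.map_cons, List.sum_cons]
    rw [ih (pvStepA acc d)]
    have : 3600 * (pvStepA acc d).1 + 60 * (pvStepA acc d).2.1 + (pvStepA acc d).2.2 =
        3600 * acc.1 + 60 * acc.2.1 + acc.2.2 + pvItemSeconds d := by
      by_cases hc : 3 ≤ ((PySem.Str.split? d ":").getD []).length <;>
        simp only [pvStepA, pvItemSeconds, hc, if_true, if_false] <;> ring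
    rw [this]; ring

-- A's carry chain equals B's two divmods of the total, component by component.
theorem pv_carry_hours (h m s : Int) :
    h + PySem.Int.floordiv (m + PySem.Int.floordiv s 60) 60 =
      PySem.Int.floordiv (3600 * h + 60 * m + s) 3600 := by
  rw [PySem.Int.floordiv_eq_ediv_of_pos (a := s) (by norm_num),
      PySem.Int.floordiv_eq_ediv_of_pos (by norm_num),
      PySem.Int.floordiv_eq_ediv_of_pos (by norm_num)]
  omega

theorem pv_carry_minutes (h m s : Int) :
    PySem.Int.mod (m + PySem.Int.floordiv s 60) 60 =
      PySem.Int.floordiv (PySem.Int.mod (3600 * h + 60 * m + s) 3600) 60 := by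
  rw [PySem.Int.floordiv_eq_ediv_of_pos (a := s) (by norm_num),
      PySem.Int.mod_eq_emod_of_pos (by norm_num),
      PySem.Int.mod_eq_emod_of_pos (by norm_num),
      PySem.Int.floordiv_eq_ediv_of_pos (by norm_num)]
  omega

theorem pv_carry_seconds (h m s : Int) :
    PySem.Int.mod s 60 =
      PySem.Int.mod (PySem.Int.mod (3600 * h + 60 * m + s) 3600) 60 := by
  rw [PySem.Int.mod_eq_emod_of_pos (a := s) (by norm_num),
      PySem.Int.mod_eq_emod_of_pos (by norm_num),
      PySem.Int.mod_eq_emod_of_pos (by norm_num)]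
  omega

-- ===== VERDICT (by name: the statement is the Claim_ definition above) =====
theorem merge_expected_durations_spec : Claim_equal_merge_expected_durations := by
  intro durations _ _
  unfold Spec_merge_expected_durations merge_expected_durations merge_expected_durations_alt
  dsimp only
  rw [pvTotalSeconds_eq]
  have htot := pv_fold_sum durations (0, 0, 0)
  simp only [mul_zero, add_zero, zero_add] at htot
  rw [← htot]
  rw [← pv_carry_hours, ← pv_carry_minutes, ← pv_carry_seconds]
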